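-- pv_equiv track=rewrite | github.com/anadepaula/bomb-inha | src/get_quadgrams.py | four_pairwise
-- ===== SOURCE A (Python) =====
-- def four_pairwise(iterable):
--     # based on itertools.pairwise
--     iterator = iter(iterable)
--
--     a = next(iterator, None)
--     b = next(iterator, None)
--     c = next(iterator, None)
--
--     for d in iterator:
--         yield a, b, c, d
--         a, b, c = b, c, d
-- ===== SOURCE B (Python) =====
-- def four_pairwise(iterable):
--     # eager list-and-index version: materialize, then read each window by position
--     items = list(iterable)
--     for i in range(len(items) - 3):
--         yield tuple(items[i:i + 4])
-- ===== Notes on version B (the rewrite author's own statement) =====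
-- stated objective: alternative
-- what changed: B materializes the input into a list and reads each 4-window by index slicing over range(len-3), instead of streaming with three rolling variables advanced via next(); note B is eager where A is lazy (return values on finite inputs are identical).
import Mathlib
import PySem

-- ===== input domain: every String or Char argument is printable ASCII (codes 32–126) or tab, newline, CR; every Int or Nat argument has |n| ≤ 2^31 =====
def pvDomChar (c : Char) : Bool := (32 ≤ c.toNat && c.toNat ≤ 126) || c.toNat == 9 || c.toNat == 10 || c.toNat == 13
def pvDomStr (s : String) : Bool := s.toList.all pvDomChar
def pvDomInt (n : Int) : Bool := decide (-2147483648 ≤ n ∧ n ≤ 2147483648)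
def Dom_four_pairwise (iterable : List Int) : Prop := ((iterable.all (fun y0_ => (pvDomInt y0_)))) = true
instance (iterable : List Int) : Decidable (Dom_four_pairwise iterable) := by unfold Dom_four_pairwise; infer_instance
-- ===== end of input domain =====

-- ===== PORT A =====
-- A: three rolling variables a,b,c seeded by next(iterator, None); the loop over the rest
-- yields (a,b,c,d) and shifts. If fewer than 4 elements are present no yield ever fires
-- (with <3 elements some of a,b,c are the None sentinel but the loop body never runs),
-- so the match below on the first three elements is exact.
def pvAGo (a b c : Int) (rest : List Int) : List (Int × Int × Int × Int) :=
  match rest with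
  | [] => []
  | d :: t => (a, b, c, d) :: pvAGo b c d t

def four_pairwise (iterable : List Int) : List (Int × Int × Int × Int) :=
  match iterable with
  | a :: b :: c :: rest => pvAGo a b c rest
  | _ => []

-- ===== PORT B =====
-- B: materialize the list, then for i in range(len-3) read the window items[i:i+4].
-- pvTuple4 is Python's tuple(...) on the 4-element slice; the fallback is unreachable
-- since the slice always has length 4 for i < len-3.
def pvTuple4 (w : List Int) : Int × Int × Int × Int :=
  (w.getD 0 0, w.getD 1 0, w.getD 2 0, w.getD 3 0)

def four_pairwise_alt (iterable : List Int) : List (Int × Int × Int × Int) :=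
  (List.range (iterable.length - 3)).map (fun (i : Nat) =>
    pvTuple4 (PySem.List.slice iterable (some ((i : Nat) : Int)) (some (((i : Nat) : Int) + 4))))

-- ===== PRECONDITION & SPEC =====
def Spec_four_pairwise (iterable : List Int) (out : List (Int × Int × Int × Int)) : Prop := out = four_pairwise_alt iterable
instance (iterable : List Int) (out : List (Int × Int × Int × Int)) : Decidable (Spec_four_pairwise iterable out) := by unfold Spec_four_pairwise; infer_instance

-- ===== CLAIM (what is proved, stated in full; the proofs are below) =====
def Claim_equal_four_pairwise : Prop := ∀ (iterable : List Int), Dom_four_pairwise iterable → Spec_four_pairwise iterable (four_pairwise iterable)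

-- ===== LEMMAS AND PROOFS =====

-- ===== VERDICT (by name: the statement is the Claim_ definition above) =====
-- common characterization: structural sliding windows
def pvWindows : List Int → List (Int × Int × Int × Int)
  | a :: b :: c :: d :: t => (a, b, c, d) :: pvWindows (b :: c :: d :: t)
  | _ => []

theorem go_eq_windows (a b c : Int) (rest : List Int) :
    pvAGo a b c rest = pvWindows (a :: b :: c :: rest) := by
  induction rest generalizing a b c with
  | nil => rfl
  | cons d t ih => simp [pvAGo, pvWindows, ih]

theorem a_eq_windows (l : List Int) : four_pairwise l = pvWindows l := by
  match l with
  | [] => rfl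
  | [a] => rfl
  | [a, b] => rfl
  | a :: b :: c :: rest => simpa [four_pairwise] using go_eq_windows a b c rest

theorem slice_nat (l : List Int) (i : Nat) :
    PySem.List.slice l (some (i : Int)) (some ((i : Int) + 4)) = (l.drop i).take 4 := by
  have := PySem.List.slice_natCast_add l i 4
  simpa using this

theorem b_eq_windows (l : List Int) : four_pairwise_alt l = pvWindows l := by
  induction l with
  | nil => rfl
  | cons a t ih =>
    match t, ih with
    | [], _ => rfl
    | [b], _ => rfl
    | [b, c], _ => rfl
    | b :: c :: d :: t', ih =>
      have hlen : (a :: b :: c :: d :: t').length - 3 = (t'.length + 1) := by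
        simp
      unfold four_pairwise_alt
      rw [hlen, List.range_succ_eq_map, List.map_cons, List.map_map]
      have h0 : PySem.List.slice (a :: b :: c :: d :: t') (some ((0 : Nat) : Int))
          (some (((0 : Nat) : Int) + 4)) = [a, b, c, d] := by
        rw [slice_nat]; rfl
      have hstep : ∀ i : Nat,
          PySem.List.slice (a :: b :: c :: d :: t') (some ((i + 1 : Nat) : Int))
            (some (((i + 1 : Nat) : Int) + 4)) =
          PySem.List.slice (b :: c :: d :: t') (some (i : Int)) (some ((i : Int) + 4)) := by
        intro i; rw [slice_nat, slice_nat]; rfl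
      have hmap : ((List.range ((b :: c :: d :: t').length - 3)).map
          (fun i => pvTuple4 (PySem.List.slice (a :: b :: c :: d :: t') (some ((i + 1 : Nat) : Int)) (some (((i + 1 : Nat) : Int) + 4))))) =
          four_pairwise_alt (b :: c :: d :: t') := by
        unfold four_pairwise_alt
        apply List.map_congr_left
        intro i _
        rw [hstep i]
      simp only [h0] at *
      calc _ = ((a, b, c, d) :: (List.range (t'.length)).map
            (fun i => pvTuple4 (PySem.List.slice (a :: b :: c :: d :: t') (some ((i + 1 : Nat) : Int)) (some (((i + 1 : Nat) : Int) + 4))))) := by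
            simp [Function.comp, h0, pvTuple4]
        _ = (a, b, c, d) :: four_pairwise_alt (b :: c :: d :: t') := by
            rw [← hmap]; simp
        _ = pvWindows (a :: b :: c :: d :: t') := by rw [ih]; rfl

theorem four_pairwise_spec : Claim_equal_four_pairwise := by
  intro l _
  unfold Spec_four_pairwise
  rw [a_eq_windows, b_eq_windows]
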